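-- pv_equiv track=rewrite | github.com/frames202/pogoda | hw/ur17.04.py | macke_allowed
-- ===== SOURCE A (Python) =====
-- def macke_allowed(string):
--     g = 0
--     allowed = []
--     dict_of_flags = {}
--     for i in string:
--         dict_of_flags[i] = False
--     while g != len(string):
--         for i in string[g:]:
--             dict_of_flags[i] = True
--             if False not in dict_of_flags.values():
--                 allowed.append(string[g:])
--         g += 1
--         for i in dict_of_flags.keys():
--             dict_of_flags[i] = False
--     return allowed
-- ===== SOURCE B (Python) =====
-- def macke_allowed(string):
--     n = len(string)
--     full = set(string)
--     out = []
--     for g in range(n):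
--         seen = set()
--         j = g
--         while j < n and seen != full:
--             seen.add(string[j])
--             j += 1
--         if seen == full:
--             suffix = string[g:]
--             out += [suffix] * (n - j + 1)
--     return out
-- ===== Notes on version B (the rewrite author's own statement) =====
-- stated objective: faster
-- what changed: Instead of re-scanning the whole flag dict for an unset flag and re-slicing the suffix at every position of every suffix, B scans each suffix once with a set only until the first position that covers all distinct characters, then emits the counted copies of one shared suffix slice at once.
import Mathlib
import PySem

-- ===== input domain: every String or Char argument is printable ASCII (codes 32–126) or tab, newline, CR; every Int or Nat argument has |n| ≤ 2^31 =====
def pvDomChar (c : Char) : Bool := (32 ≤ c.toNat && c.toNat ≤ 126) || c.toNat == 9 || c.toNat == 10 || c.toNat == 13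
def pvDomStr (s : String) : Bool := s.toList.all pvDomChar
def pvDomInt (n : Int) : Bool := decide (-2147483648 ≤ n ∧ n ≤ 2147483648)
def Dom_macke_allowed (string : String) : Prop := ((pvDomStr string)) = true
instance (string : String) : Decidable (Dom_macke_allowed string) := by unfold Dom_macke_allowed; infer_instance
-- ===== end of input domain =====

-- B replaces A's per-position full-dict re-check and repeated suffix slicing by one early-exit
-- scan per start that finds the first position covering all distinct characters, then emits the
-- counted copies at once (objective: faster).

-- ===== PORT A =====
-- inner 'for i in string[g:]': set flag, append string[g:] when no flag is False
def pvAStep (sfx : String) (p : PySem.Dict Char Bool × List String) (c : Char) :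
    PySem.Dict Char Bool × List String :=
  let d := p.1.insert c true
  if (PySem.Dict.values d).contains false then (d, p.2) else (d, p.2 ++ [sfx])

-- 'while g != len(string)' : g only ever steps 0,1,…, so the guard is g < len
def pvALoop (s : String) (g : Nat) (d : PySem.Dict Char Bool) (acc : List String) : List String :=
  if h : g < s.toList.length then
    let sfx := PySem.Str.slice s (some (g : Int)) none      -- string[g:]
    let p := sfx.toList.foldl (pvAStep sfx) (d, acc)
    -- 'for i in dict_of_flags.keys(): dict_of_flags[i] = False'
    let d2 := (PySem.Dict.keys p.1).foldl (fun d' k => d'.insert k false) p.1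
    pvALoop s (g + 1) d2 p.2
  else acc
termination_by s.toList.length - g
decreasing_by have : s.toList.length = s.length := by simp
              omega

def macke_allowed (string : String) : List String :=
  let d0 := string.toList.foldl (fun d c => d.insert c false) PySem.Dict.empty
  pvALoop string 0 d0 []

-- ===== PORT B =====
-- 'while j < n and seen != full: seen.add(string[j]); j += 1'
def pvBScan (cs : List Char) (full : PySem.Set Char) (seen : PySem.Set Char) (j : Nat) :
    PySem.Set Char × Nat :=
  if h : j < cs.length then
    if PySem.Set.equal seen full then (seen, j)
    else pvBScan cs full (PySem.Set.add seen cs[j]) (j + 1)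
  else (seen, j)
termination_by cs.length - j

def macke_allowed_alt (string : String) : List String :=
  let cs := string.toList
  let n := cs.length
  let full := PySem.Set.ofList cs
  (List.range n).foldl (fun out g =>
    let p := pvBScan cs full PySem.Set.empty g
    if PySem.Set.equal p.1 full then
      out ++ List.replicate (n - p.2 + 1) (PySem.Str.slice string (some (g : Int)) none)
    else out) []

-- ===== PRECONDITION & SPEC =====
def Spec_macke_allowed (string : String) (out : List String) : Prop := out = macke_allowed_alt string
instance (string : String) (out : List String) : Decidable (Spec_macke_allowed string out) := by unfold Spec_macke_allowed; infer_instance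

-- ===== CLAIM (what is proved, stated in full; the proofs are below) =====
def Claim_equal_macke_allowed : Prop := ∀ (string : String), Dom_macke_allowed string → Spec_macke_allowed string (macke_allowed string)

-- ===== LEMMAS AND PROOFS =====

-- a dict whose keys are K and whose value at k is P k
def mkD (K : List Char) (P : Char → Bool) : PySem.Dict Char Bool :=
  ⟨K.map (fun k => (k, P k))⟩

theorem mkD_congr {K : List Char} {P Q : Char → Bool} (h : ∀ k ∈ K, P k = Q k) :
    mkD K P = mkD K Q := by
  unfold mkD
  exact congrArg PySem.Dict.mk (List.map_congr_left (fun k hk => by rw [h k hk]))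

theorem keys_mkD (K : List Char) (P : Char → Bool) : (mkD K P).keys = K := by
  simp only [mkD, PySem.Dict.keys_mk, List.map_map]
  exact List.map_id'' (fun _ => rfl) _

theorem values_mkD (K : List Char) (P : Char → Bool) : (mkD K P).values = K.map P := by
  simp [mkD, PySem.Dict.values_mk]

theorem contains_mkD (K : List Char) (P : Char → Bool) (c : Char) :
    (mkD K P).contains c = K.contains c := by
  have h0 : (mkD K P).contains c = (K.map (fun k => (k, P k))).any (fun p => p.1 == c) :=
    PySem.Dict.contains_mk _ _
  rw [h0]; clear h0
  induction K with
  | nil => rfl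
  | cons a t ih =>
    simp only [List.map_cons, List.any_cons, List.contains_cons]
    have hcomm : (a == c) = (c == a) := by simp [eq_comm]
    rw [ih, hcomm]

theorem insert_mkD_mem (K : List Char) (P : Char → Bool) {c : Char} (hc : c ∈ K) (v : Bool) :
    (mkD K P).insert c v = mkD K (fun k => if k == c then v else P k) := by
  have h1 : (mkD K P).contains c = true := by
    rw [contains_mkD]; exact (List.contains_iff_mem).2 hc
  have h2 := PySem.Dict.items_insert_of_contains (mkD K P) v h1
  have h3 : (mkD K P).items = K.map (fun k => (k, P k)) := rfl
  rw [h3] at h2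
  have : (mkD K P).insert c v = ⟨((mkD K P).insert c v).items⟩ := rfl
  rw [this, h2]
  unfold mkD
  congr 1
  rw [List.map_map]
  apply List.map_congr_left
  intro k _
  simp only [Function.comp_apply]
  by_cases hk : k == c
  · have : k = c := by simpa using hk
    subst this
    simp [hk]
  · rw [if_neg hk, if_neg hk]

theorem insert_mkD_not_mem (K : List Char) {c : Char} (hc : c ∉ K) :
    (mkD K (fun _ => false)).insert c false = mkD (K ++ [c]) (fun _ => false) := by
  have h1 : (mkD K (fun _ => false)).contains c = false := by
    rw [contains_mkD]
    simpa using hc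
  have h2 := PySem.Dict.items_insert_of_not_contains (mkD K (fun _ => false)) false h1
  have : (mkD K (fun _ => false)).insert c false = ⟨((mkD K (fun _ => false)).insert c false).items⟩ := rfl
  rw [this, h2]
  unfold mkD
  congr 1
  simp

-- building the flag dict: inserting False for every char accumulates the distinct keys
theorem build_mkD (cs : List Char) : ∀ S : PySem.Set Char,
    cs.foldl (fun d c => d.insert c false) (mkD S (fun _ => false))
      = mkD (PySem.Set.update S cs) (fun _ => false) := by
  induction cs with
  | nil => intro S; simp [PySem.Set.update_nil]
  | cons c cs' ih =>
    intro S
    rw [List.foldl_cons, PySem.Set.update_cons]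
    by_cases hc : c ∈ S
    · rw [insert_mkD_mem S _ hc, PySem.Set.add_of_mem hc,
        show mkD S (fun k => if k == c then false else false) = mkD S (fun _ => false) from
          mkD_congr (fun k _ => by by_cases hk : k == c <;> simp [hk])]
      exact ih S
    · rw [insert_mkD_not_mem S hc, PySem.Set.add_of_not_mem hc]
      exact ih (S ++ [c])

-- resetting: inserting False for every key of K gives the all-False dict back
theorem reset_mkD (K : List Char) (P : Char → Bool) (L : List Char) (hL : ∀ c ∈ L, c ∈ K) :
    L.foldl (fun d k => d.insert k false) (mkD K P)
      = mkD K (fun k => !(L.contains k) && P k) := by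
  induction L generalizing P with
  | nil => simp
  | cons a L' ih =>
    rw [List.foldl_cons, insert_mkD_mem K _ (hL a (by simp)),
      ih _ (fun c hcl => hL c (by simp [hcl]))]
    apply mkD_congr
    intro k _
    by_cases hk : k == a
    · have hka : k = a := by simpa using hk
      subst hka
      simp
    · have hka : ¬ k = a := by simpa using hk
      simp [hk, hka]

-- the coverage test A performs: 'False not in dict.values()'
theorem values_no_false (K : List Char) (P : Char → Bool) :
    ((mkD K P).values.contains false = false) ↔ ∀ k ∈ K, P k = true := by
  rw [values_mkD]
  simp

-- proof-side mirror of B's scan, on the remaining suffix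
def pvScanT (K : List Char) : List Char → PySem.Set Char → PySem.Set Char × List Char
  | [], S => (S, [])
  | c :: t, S => if PySem.Set.equal S K then (S, c :: t) else pvScanT K t (PySem.Set.add S c)

def pvOut (K : List Char) (sfx : String) (t : List Char) (S : PySem.Set Char) : List String :=
  if PySem.Set.equal (pvScanT K t S).1 K then List.replicate ((pvScanT K t S).2.length + 1) sfx else []

theorem pvScanT_covered (K : List Char) (t : List Char) (S : PySem.Set Char)
    (h : PySem.Set.equal S K = true) : pvScanT K t S = (S, t) := by
  cases t with
  | nil => rfl
  | cons c t' => simp [pvScanT, h]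

theorem pvScanT_len_le (K : List Char) (t : List Char) (S : PySem.Set Char) :
    (pvScanT K t S).2.length ≤ t.length := by
  induction t generalizing S with
  | nil => simp [pvScanT]
  | cons c t' ih =>
    rw [pvScanT]
    split
    · simp
    · exact le_trans (ih _) (by simp)

theorem contains_add (S : PySem.Set Char) (c k : Char) :
    (PySem.Set.add S c).contains k = (k == c || S.contains k) := by
  apply Bool.eq_iff_iff.mpr
  simp [PySem.Set.mem_add]
  tauto

theorem insert_true_add (K : List Char) (S : PySem.Set Char) {c : Char} (hc : c ∈ K) :
    (mkD K (fun k => S.contains k)).insert c true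
      = mkD K (fun k => (PySem.Set.add S c).contains k) := by
  rw [insert_mkD_mem K _ hc]
  apply mkD_congr
  intro k _
  rw [contains_add]
  by_cases hk : k == c <;> simp [hk]

-- saturated inner loop: once every key is covered, every remaining char appends once
theorem aFold_sat (K : List Char) (sfx : String) :
    ∀ (t : List Char) (S : PySem.Set Char) (acc : List String),
      (∀ c ∈ t, c ∈ K) → (∀ x ∈ S, x ∈ K) → (∀ k ∈ K, k ∈ S) →
      t.foldl (pvAStep sfx) (mkD K (fun k => S.contains k), acc)
        = (mkD K (fun k => S.contains k), acc ++ List.replicate t.length sfx) := by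
  intro t
  induction t with
  | nil => intro S acc _ _ _; simp
  | cons c t' ih =>
    intro S acc ht hS hKS
    have hc : c ∈ K := ht c (by simp)
    have hd : (mkD K (fun k => S.contains k)).insert c true = mkD K (fun k => S.contains k) := by
      rw [insert_true_add K S hc]
      apply mkD_congr
      intro k hkK
      have hsk : S.contains k = true := (PySem.Set.contains_iff _ _).mpr (hKS k hkK)
      rw [contains_add, hsk]
      simp
    have hcov : ((mkD K (fun k => S.contains k)).values.contains false) = false :=
      (values_no_false _ _).mpr (fun k hk => (PySem.Set.contains_iff _ _).mpr (hKS k hk))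
    rw [List.foldl_cons]
    show t'.foldl (pvAStep sfx) (pvAStep sfx (mkD K (fun k => S.contains k), acc) c) = _
    rw [show pvAStep sfx (mkD K (fun k => S.contains k), acc) c
          = (mkD K (fun k => S.contains k), acc ++ [sfx]) by
        simp only [pvAStep, hd, hcov]
        simp]
    rw [ih S (acc ++ [sfx]) (fun x hx => ht x (by simp [hx])) hS hKS]
    simp [List.replicate_succ]

-- main inner-loop lemma: A's flag fold appends exactly B's counted copies
theorem aFold_main (K : List Char) (sfx : String) :
    ∀ (t : List Char) (S : PySem.Set Char) (acc : List String),
      (∀ c ∈ t, c ∈ K) → (∀ x ∈ S, x ∈ K) → PySem.Set.equal S K = false →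
      ∃ P, t.foldl (pvAStep sfx) (mkD K (fun k => S.contains k), acc)
        = (mkD K P, acc ++ pvOut K sfx t S) := by
  intro t
  induction t with
  | nil =>
    intro S acc _ _ hne
    exact ⟨fun k => S.contains k, by simp [pvOut, pvScanT, hne]⟩
  | cons c t' ih =>
    intro S acc ht hS hne
    have hc : c ∈ K := ht c (by simp)
    have hS' : ∀ x ∈ PySem.Set.add S c, x ∈ K := by
      intro x hx
      rcases (PySem.Set.mem_add S c x).1 hx with h | h
      · exact hS x h
      · exact h ▸ hc
    have ht' : ∀ x ∈ t', x ∈ K := fun x hx => ht x (by simp [hx])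
    have hout : pvOut K sfx (c :: t') S = pvOut K sfx t' (PySem.Set.add S c) := by
      simp [pvOut, pvScanT, hne]
    cases hcov : PySem.Set.equal (PySem.Set.add S c) K with
    | true =>
      have hall : ∀ k ∈ K, k ∈ PySem.Set.add S c :=
        fun k hk => ((PySem.Set.equal_iff _ _).1 hcov k).2 hk
      have hvals : ((mkD K (fun k => (PySem.Set.add S c).contains k)).values.contains false) = false :=
        (values_no_false _ _).mpr (fun k hk => (PySem.Set.contains_iff _ _).mpr (hall k hk))
      rw [List.foldl_cons,
        show pvAStep sfx (mkD K (fun k => S.contains k), acc) c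
            = (mkD K (fun k => (PySem.Set.add S c).contains k), acc ++ [sfx]) by
          simp only [pvAStep, insert_true_add K S hc, hvals]
          simp,
        aFold_sat K sfx t' (PySem.Set.add S c) (acc ++ [sfx]) ht' hS' hall]
      refine ⟨fun k => (PySem.Set.add S c).contains k, ?_⟩
      rw [hout]
      simp [pvOut, pvScanT_covered K t' _ hcov, hcov, List.replicate_succ]
    | false =>
      have hvals : ((mkD K (fun k => (PySem.Set.add S c).contains k)).values.contains false) = true := by
        cases hv : ((mkD K (fun k => (PySem.Set.add S c).contains k)).values.contains false) with
        | true => rfl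
        | false =>
          exfalso
          have hall := (values_no_false _ _).mp hv
          have : PySem.Set.equal (PySem.Set.add S c) K = true :=
            (PySem.Set.equal_iff _ _).2 (fun x =>
              ⟨fun hx => hS' x hx, fun hx => (PySem.Set.contains_iff _ _).1 (hall x hx)⟩)
          rw [this] at hcov
          exact absurd hcov (by simp)
      rw [List.foldl_cons,
        show pvAStep sfx (mkD K (fun k => S.contains k), acc) c
            = (mkD K (fun k => (PySem.Set.add S c).contains k), acc) by
          simp only [pvAStep, insert_true_add K S hc, hvals]
          simp,
        hout]
      exact ih (PySem.Set.add S c) acc ht' hS' hcov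

-- B's indexed scan is the suffix scan
theorem pvBScan_eq (cs : List Char) (K : PySem.Set Char) :
    ∀ (j : Nat) (S : PySem.Set Char), j ≤ cs.length →
      pvBScan cs K S j = ((pvScanT K (cs.drop j) S).1, cs.length - (pvScanT K (cs.drop j) S).2.length) := by
  suffices h : ∀ (m j : Nat) (S : PySem.Set Char), j ≤ cs.length → cs.length - j ≤ m →
      pvBScan cs K S j = ((pvScanT K (cs.drop j) S).1, cs.length - (pvScanT K (cs.drop j) S).2.length) from
    fun j S hj => h (cs.length - j) j S hj le_rfl
  intro m
  induction m with
  | zero =>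
    intro j S hj hm
    have hj' : j = cs.length := by omega
    subst hj'
    rw [pvBScan, dif_neg (by omega), List.drop_length]
    simp [pvScanT]
  | succ m ih =>
    intro j S hj hm
    by_cases h : j < cs.length
    · rw [pvBScan, dif_pos h]
      have hdrop : cs.drop j = cs[j] :: cs.drop (j + 1) := (List.getElem_cons_drop h).symm
      cases he : PySem.Set.equal S K with
      | true =>
        rw [if_pos rfl, hdrop]
        have : pvScanT K (cs[j] :: cs.drop (j + 1)) S = (S, cs[j] :: cs.drop (j + 1)) := by
          simp [pvScanT, he]
        rw [this]
        have hlen : (cs[j] :: cs.drop (j + 1)).length = cs.length - j := by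
          simp only [List.length_cons, List.length_drop]
          omega
        rw [hlen]
        exact congrArg (Prod.mk S) (by omega)
      | false =>
        rw [if_neg (by simp), hdrop]
        have : pvScanT K (cs[j] :: cs.drop (j + 1)) S = pvScanT K (cs.drop (j + 1)) (PySem.Set.add S cs[j]) := by
          simp [pvScanT, he]
        rw [this]
        exact ih (j + 1) (PySem.Set.add S cs[j]) (by omega) (by omega)
    · have hj' : j = cs.length := by omega
      subst hj'
      rw [pvBScan, dif_neg (by omega), List.drop_length]
      simp [pvScanT]

theorem outer_loop (s : String) :
    ∀ (g : Nat) (acc : List String), g ≤ s.toList.length →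
      pvALoop s g (mkD (PySem.Set.ofList s.toList) (fun _ => false)) acc
        = acc ++ (List.range' g (s.toList.length - g)).flatMap
            (fun (g' : Nat) => pvOut (PySem.Set.ofList s.toList) (PySem.Str.slice s (some (g' : Int)) none)
                         (s.toList.drop g') PySem.Set.empty) := by
  suffices hmain : ∀ (m g : Nat) (acc : List String), g ≤ s.toList.length → s.toList.length - g ≤ m →
      pvALoop s g (mkD (PySem.Set.ofList s.toList) (fun _ => false)) acc
        = acc ++ (List.range' g (s.toList.length - g)).flatMap
            (fun (g' : Nat) => pvOut (PySem.Set.ofList s.toList) (PySem.Str.slice s (some (g' : Int)) none)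
                         (s.toList.drop g') PySem.Set.empty) from
    fun g acc hg => hmain (s.toList.length - g) g acc hg le_rfl
  intro m
  induction m with
  | zero =>
    intro g acc hg hm
    have hg' : g = s.toList.length := by omega
    rw [pvALoop, dif_neg (by omega), hg']
    simp
  | succ m ih =>
    intro g acc hg hm
    by_cases h : g < s.toList.length
    · have hK : ∀ c ∈ s.toList.drop g, c ∈ PySem.Set.ofList s.toList :=
        fun c hc => (PySem.Set.mem_ofList _ _).2 (List.mem_of_mem_drop hc)
      have hE : ∀ x ∈ (PySem.Set.empty : PySem.Set Char), x ∈ PySem.Set.ofList s.toList := by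
        intro x hx
        exact absurd hx (by simp [PySem.Set.empty])
      have hne : PySem.Set.equal PySem.Set.empty (PySem.Set.ofList s.toList) = false := by
        cases hb : PySem.Set.equal PySem.Set.empty (PySem.Set.ofList s.toList) with
        | false => rfl
        | true =>
          exact absurd ((((PySem.Set.equal_iff _ _).1 hb) s.toList[g]).2
            ((PySem.Set.mem_ofList _ _).2 (List.getElem_mem h))) (by simp [PySem.Set.empty])
      have hini : mkD (PySem.Set.ofList s.toList) (fun _ => false)
          = mkD (PySem.Set.ofList s.toList) (fun k => (PySem.Set.empty : PySem.Set Char).contains k) :=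
        mkD_congr (fun k _ => by simp [PySem.Set.empty, PySem.Set.contains_eq_listContains])
      obtain ⟨P, hP⟩ := aFold_main (PySem.Set.ofList s.toList)
        (PySem.Str.slice s (some (g : Int)) none) (s.toList.drop g) PySem.Set.empty acc hK hE hne
      have htl : (PySem.Str.slice s (some (g : Int)) none).toList = s.toList.drop g := by
        rw [PySem.Str.toList_slice]
        simp [PySem.Chars.slice]
      have hreset : ((mkD (PySem.Set.ofList s.toList) P).keys).foldl
            (fun d' k => d'.insert k false) (mkD (PySem.Set.ofList s.toList) P)
          = mkD (PySem.Set.ofList s.toList) (fun _ => false) := by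
        rw [keys_mkD, reset_mkD _ _ _ (fun c hc => hc)]
        apply mkD_congr
        intro k hk
        have hck : List.contains (PySem.Set.ofList s.toList) k = true := (List.contains_iff_mem).2 hk
        rw [hck]
        rfl
      rw [pvALoop, dif_pos h]
      simp only [htl, hini, hP, hreset]
      rw [← hini, ih (g + 1) _ (by omega) (by omega)]
      have hrange : s.toList.length - g = (s.toList.length - (g + 1)) + 1 := by omega
      rw [hrange, List.range'_succ, List.flatMap_cons, ← List.append_assoc]
    · rw [pvALoop, dif_neg h]
      have hg' : g = s.toList.length := by omega
      rw [hg']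
      simp

-- ===== VERDICT (by name: the statement is the Claim_ definition above) =====
theorem macke_allowed_spec : Claim_equal_macke_allowed := by
  intro s _
  unfold Spec_macke_allowed
  simp only [macke_allowed, macke_allowed_alt]
  have hd0 : s.toList.foldl (fun d c => d.insert c false) PySem.Dict.empty
      = mkD (PySem.Set.ofList s.toList) (fun _ => false) := by
    have h1 : (PySem.Dict.empty : PySem.Dict Char Bool) = mkD [] (fun _ => false) := rfl
    rw [h1, build_mkD s.toList [], PySem.Set.update_nil_left]
  rw [hd0, outer_loop s 0 [] (Nat.zero_le _)]
  have hcong : ∀ (out : List String), ∀ g ∈ List.range s.toList.length,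
      (if (pvBScan s.toList (PySem.Set.ofList s.toList) PySem.Set.empty g).1.equal (PySem.Set.ofList s.toList) = true then
         out ++ List.replicate (s.toList.length - (pvBScan s.toList (PySem.Set.ofList s.toList) PySem.Set.empty g).2 + 1)
           (PySem.Str.slice s (some (g : Int)) none)
       else out)
      = out ++ pvOut (PySem.Set.ofList s.toList) (PySem.Str.slice s (some (g : Int)) none)
          (s.toList.drop g) PySem.Set.empty := by
    intro out g hg
    have hglt : g < s.toList.length := List.mem_range.1 hg
    have hq := pvBScan_eq s.toList (PySem.Set.ofList s.toList) g PySem.Set.empty (le_of_lt hglt)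
    set q := pvScanT (PySem.Set.ofList s.toList) (s.toList.drop g) PySem.Set.empty with hqdef
    have hlen : q.2.length ≤ s.toList.length := le_trans (pvScanT_len_le _ _ _) (by simp)
    rw [hq]
    simp only [pvOut, ← hqdef]
    cases he : PySem.Set.equal q.1 (PySem.Set.ofList s.toList) with
    | true =>
      rw [show s.toList.length - (s.toList.length - q.2.length) + 1 = q.2.length + 1 from by omega]
      simp
    | false => simp
  rw [PySem.List.foldl_congr_mem _ _ _ _ hcong, PySem.List.foldl_append_eq_flatMap, List.range_eq_range']
  simp
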